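-- pv_equiv track=rewrite | github.com/AlgoLab/cancer_ea | prog/collection_helpers.py | largest_set_in_both_lists
-- ===== SOURCE A (Python) =====
-- def sets_are_equal(set1,set2):
--     """ Checks if sets are equal
--
--     Args:
--         set1 (set): first set for comparison.
--         set2 (set): second set for comparison.
--
--     Returns:
--         boolean that indicate equality of the sets
--     """
--     for x in set1:
--         if( not x in set2):
--             return False;
--     for x in set2:
--         if( not x in set1):
--             return False;
--     return True
--
-- def largest_set_in_both_lists(list1, list2):
--     """ Obtaion the largest set contained in both lists
--
--     Args:
--         list1 (list): first list with sets.
--         list2 (list): second list with sets.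
--
--     Returns:
--         largest set that is contained in  both lists. If there is no common
--         elements in those lists, return empty set.
--     """
--     intersect = set()
--     for s1 in list1:
--         for s2 in list2:
--             if(len(s1)>0 and len(s2)>0 and sets_are_equal(s1, s2)):
--                 if( len(s1)>len(intersect)):
--                     intersect = s1
--     return intersect
-- ===== SOURCE B (Python) =====
-- def largest_set_in_both_lists(list1, list2):
--     """Largest set contained in both lists: hash list2's non-empty sets as
--     frozensets once, then a single pass over list1 tracking the largest match."""
--     pool = {frozenset(s) for s in list2 if s}
--     best = set()
--     for s1 in list1:
--         if s1 and len(s1) > len(best) and frozenset(s1) in pool: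
--             best = s1
--     return best
-- ===== Notes on version B (the rewrite author's own statement) =====
-- stated objective: alternative
-- what changed: A compares every set of list1 element-wise against every set of list2 in a nested scan; B hashes list2's non-empty sets as frozensets once and makes a single pass over list1, testing each candidate by one hash lookup.
import Mathlib
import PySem

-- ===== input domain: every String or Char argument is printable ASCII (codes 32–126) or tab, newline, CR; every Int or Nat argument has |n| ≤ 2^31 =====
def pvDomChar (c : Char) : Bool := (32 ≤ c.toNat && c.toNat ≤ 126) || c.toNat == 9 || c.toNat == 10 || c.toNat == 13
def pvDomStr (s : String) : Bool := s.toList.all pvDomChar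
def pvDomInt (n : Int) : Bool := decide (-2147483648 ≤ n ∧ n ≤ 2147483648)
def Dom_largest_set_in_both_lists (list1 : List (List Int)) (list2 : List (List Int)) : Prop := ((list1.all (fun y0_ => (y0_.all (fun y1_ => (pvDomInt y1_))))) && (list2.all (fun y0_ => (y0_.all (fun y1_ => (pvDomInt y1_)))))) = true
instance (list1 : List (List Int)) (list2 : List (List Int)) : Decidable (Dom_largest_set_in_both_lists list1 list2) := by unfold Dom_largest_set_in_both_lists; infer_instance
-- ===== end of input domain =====

-- B replaces A's nested scan (every set of list1 compared element-wise against every set of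
-- list2) by hashing list2's non-empty sets as frozensets once and a single pass over list1.

-- ===== PORT A =====
-- helper sets_are_equal: two membership loops, early False
def pvSetsAreEqual (set1 : List Int) (set2 : List Int) : Bool :=
  if set1.all (fun x => set2.contains x) then set2.all (fun x => set1.contains x) else false

def largest_set_in_both_lists (list1 : List (List Int)) (list2 : List (List Int)) : List Int :=
  list1.foldl (fun intersect s1 =>
    list2.foldl (fun intersect s2 =>
      if s1.length > 0 && s2.length > 0 && pvSetsAreEqual s1 s2 then
        (if s1.length > intersect.length then s1 else intersect)
      else intersect) intersect) []

-- ===== PORT B =====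
-- frozenset(s) is modelled exactly (for equality/hash-membership) by the strictly
-- sorted list of s's distinct elements
def pvCanon (s : List Int) : List Int := PySem.List.sorted (PySem.Set.ofList s) (fun x => x) false

def largest_set_in_both_lists_alt (list1 : List (List Int)) (list2 : List (List Int)) : List Int :=
  let pool : PySem.Set (List Int) :=
    PySem.Set.ofList ((list2.filter (fun s => !s.isEmpty)).map pvCanon)
  list1.foldl (fun best s1 =>
    if !s1.isEmpty && decide (s1.length > best.length) && pool.contains (pvCanon s1) then s1
    else best) []

-- ===== PRECONDITION & SPEC =====
def Spec_largest_set_in_both_lists (list1 : List (List Int)) (list2 : List (List Int)) (out : List Int) : Prop := out = largest_set_in_both_lists_alt list1 list2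
instance (list1 : List (List Int)) (list2 : List (List Int)) (out : List Int) : Decidable (Spec_largest_set_in_both_lists list1 list2 out) := by unfold Spec_largest_set_in_both_lists; infer_instance

-- ===== CLAIM (what is proved, stated in full; the proofs are below) =====
def Claim_equal_largest_set_in_both_lists : Prop := ∀ (list1 : List (List Int)) (list2 : List (List Int)), Dom_largest_set_in_both_lists list1 list2 → Spec_largest_set_in_both_lists list1 list2 (largest_set_in_both_lists list1 list2)

-- ===== LEMMAS AND PROOFS =====

-- canonical forms coincide iff the two lists have the same members
theorem pvCanon_eq_iff (s1 s2 : List Int) :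
    pvCanon s1 = pvCanon s2 ↔ ∀ x, x ∈ s1 ↔ x ∈ s2 := by
  unfold pvCanon
  rw [PySem.List.sorted_id_eq_sorted_id_iff_perm,
    List.perm_ext_iff_of_nodup (PySem.Set.nodup_ofList _) (PySem.Set.nodup_ofList _)]
  simp [PySem.Set.mem_ofList]

theorem pvSetsAreEqual_iff (s1 s2 : List Int) :
    pvSetsAreEqual s1 s2 = true ↔ ∀ x, x ∈ s1 ↔ x ∈ s2 := by
  unfold pvSetsAreEqual
  by_cases h : s1.all (fun x => s2.contains x) = true <;> simp_all [List.all_eq_true]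
  · constructor
    · intro h2 x
      exact ⟨fun hx => h x hx, fun hx => h2 x hx⟩
    · intro h2 x hx
      exact (h2 x).mpr hx
  · rcases h with ⟨x, hx, hnx⟩
    exact iff_of_false (fun h2 => hnx (h2.1 x hx)) (fun h2 => hnx ((h2 x).mp hx))

-- membership of canon s1 in the hashed pool = an existential over list2
theorem pool_contains_eq (list2 : List (List Int)) (s1 : List Int) :
    (PySem.Set.ofList ((list2.filter (fun s => !s.isEmpty)).map pvCanon)).contains (pvCanon s1)
      = list2.any (fun s2 => decide (s2.length > 0) && pvSetsAreEqual s1 s2) := by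
  rw [Bool.eq_iff_iff]
  simp only [List.any_eq_true, Bool.and_eq_true, decide_eq_true_eq]
  constructor
  · intro h
    have h' : pvCanon s1 ∈ (list2.filter (fun s => !s.isEmpty)).map pvCanon := by
      simpa [PySem.Set.mem_ofList] using h
    rcases List.mem_map.mp h' with ⟨s2, hs2, hc⟩
    rcases List.mem_filter.mp hs2 with ⟨hmem, hne⟩
    refine ⟨s2, hmem, ?_, ?_⟩
    · cases s2 <;> simp_all
    · exact (pvSetsAreEqual_iff s1 s2).mpr (fun x => ((pvCanon_eq_iff s2 s1).mp hc x).symm)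
  · rintro ⟨s2, hmem, hlen, heq⟩
    have hc : pvCanon s2 = pvCanon s1 :=
      (pvCanon_eq_iff s2 s1).mpr (fun x => ((pvSetsAreEqual_iff s1 s2).mp heq x).symm)
    have : pvCanon s1 ∈ (list2.filter (fun s => !s.isEmpty)).map pvCanon := by
      refine List.mem_map.mpr ⟨s2, List.mem_filter.mpr ⟨hmem, ?_⟩, hc⟩
      cases s2 <;> simp_all
    simpa [PySem.Set.mem_ofList] using this

-- A's inner loop over list2 computes B's single-step update
theorem inner_loop_eq (s1 : List Int) (l2 : List (List Int)) (acc : List Int) :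
    l2.foldl (fun intersect s2 =>
      if s1.length > 0 && s2.length > 0 && pvSetsAreEqual s1 s2 then
        (if s1.length > intersect.length then s1 else intersect)
      else intersect) acc
    = if decide (s1.length > 0) && decide (s1.length > acc.length)
         && l2.any (fun s2 => decide (s2.length > 0) && pvSetsAreEqual s1 s2) then s1 else acc := by
  induction l2 generalizing acc with
  | nil => simp
  | cons s2 t ih =>
    simp only [List.foldl_cons, List.any_cons]
    by_cases h1 : s1.length > 0
    · by_cases h2 : s2.length > 0
      · by_cases h3 : pvSetsAreEqual s1 s2 = true
        · by_cases h4 : s1.length > acc.length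
          · rw [if_pos (by simp [h1, h2, h3]), if_pos h4, ih]
            simp [h4]
            intro h5
            exact absurd h3 (by simp [(h5 h1).1 h2])
          · rw [if_pos (by simp [h1, h2, h3]), if_neg h4, ih]
            simp [h4]
        · rw [if_neg (by simp [h3]), ih]
          simp [h3]
      · rw [if_neg (by simp [h2]), ih]
        simp [h2]
    · rw [if_neg (by simp [h1]), ih]
      simp [h1]

theorem outer_loop_eq (l1 l2 : List (List Int)) (acc : List Int) :
    l1.foldl (fun intersect s1 =>
      l2.foldl (fun intersect s2 =>
        if s1.length > 0 && s2.length > 0 && pvSetsAreEqual s1 s2 then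
          (if s1.length > intersect.length then s1 else intersect)
        else intersect) intersect) acc
    = l1.foldl (fun best s1 =>
        if !s1.isEmpty && decide (s1.length > best.length)
            && (PySem.Set.ofList ((l2.filter (fun s => !s.isEmpty)).map pvCanon)).contains (pvCanon s1)
        then s1 else best) acc := by
  induction l1 generalizing acc with
  | nil => rfl
  | cons s1 t ih =>
    simp only [List.foldl_cons]
    rw [inner_loop_eq, pool_contains_eq]
    have hne : (!s1.isEmpty) = decide (s1.length > 0) := by cases s1 <;> simp
    rw [hne, ih]

-- ===== VERDICT (by name: the statement is the Claim_ definition above) =====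
theorem largest_set_in_both_lists_spec : Claim_equal_largest_set_in_both_lists := by
  intro list1 list2 _
  unfold Spec_largest_set_in_both_lists largest_set_in_both_lists largest_set_in_both_lists_alt
  exact outer_loop_eq list1 list2 []
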